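-- pv_equiv track=rewrite | github.com/pritice/EuRoC_Demo | scripts/step3_cache_masks_dino_sam2.py | map_phrase_to_class_id
-- ===== SOURCE A (Python) =====
-- from typing import List, Dict, Tuple
--
-- def normalize_text(s: str) -> str:
--     s = s.lower().strip()
--     s = s.replace(",", " ").replace(";", " ").replace(":", " ")
--     s = " ".join(s.split())
--     return s
--
-- def map_phrase_to_class_id(phrase: str, class_to_id: Dict[str, int]) -> int:
--     p = normalize_text(phrase)
--     # 优先精确匹配，再做包含匹配
--     if p in class_to_id:
--         return int(class_to_id[p])
--     for k in sorted(class_to_id.keys(), key=len, reverse=True):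
--         if k in p:
--             return int(class_to_id[k])
--     return 0
-- ===== SOURCE B (Python) =====
-- def normalize_text(s: str) -> str:
--     s = s.lower().strip()
--     s = s.replace(",", " ").replace(";", " ").replace(":", " ")
--     s = " ".join(s.split())
--     return s
--
-- def map_phrase_to_class_id(phrase: str, class_to_id) -> int:
--     # One pass with a (best_len, best_id) accumulator: keep the first longest key
--     # that is a substring of p.  An exact match is automatically the unique
--     # longest such key, so the exact-match fast path is unnecessary.
--     p = normalize_text(phrase)
--     best_len = -1
--     best_id = 0
--     for k, v in class_to_id.items():
--         if len(k) > best_len and k in p: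
--             best_len = len(k)
--             best_id = int(v)
--     return best_id
-- ===== Notes on version B (the rewrite author's own statement) =====
-- stated objective: simpler
-- what changed: Replaced the exact-match branch plus sort-by-descending-length plus early-return scan with one accumulator pass over the dict items keeping the first strictly-longest substring candidate; strict '>' reproduces the stable sort's insertion-order tie-break and an exact match is automatically the unique longest candidate.
import Mathlib
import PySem

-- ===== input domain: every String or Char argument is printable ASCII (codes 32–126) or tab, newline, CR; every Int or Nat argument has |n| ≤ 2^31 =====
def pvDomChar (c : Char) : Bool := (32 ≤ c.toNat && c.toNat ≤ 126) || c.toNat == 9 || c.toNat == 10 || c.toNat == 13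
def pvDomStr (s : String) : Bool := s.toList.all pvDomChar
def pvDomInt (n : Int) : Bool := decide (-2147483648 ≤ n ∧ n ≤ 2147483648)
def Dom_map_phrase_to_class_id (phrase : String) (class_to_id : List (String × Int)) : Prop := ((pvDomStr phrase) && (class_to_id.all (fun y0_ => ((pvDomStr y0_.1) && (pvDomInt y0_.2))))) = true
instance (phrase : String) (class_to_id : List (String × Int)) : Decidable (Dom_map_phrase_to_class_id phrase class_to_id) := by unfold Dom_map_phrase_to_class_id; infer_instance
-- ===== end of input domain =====

-- B replaces A's exact-match branch + length-descending stable sort + early-return scan by a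
-- single accumulator pass (best_len, best_id) over the dict items; objective: simpler.

-- ===== PORT A =====
-- shared helper: the Python normalize_text, unchanged in both A and B
def normalize_text (s : String) : String :=
  let s1 := PySem.Str.strip (PySem.Str.lower s)
  let s2 := PySem.Str.replace (PySem.Str.replace (PySem.Str.replace s1 "," " ") ";" " ") ":" " "
  PySem.Str.join " " (PySem.Str.split₀ s2)

def map_phrase_to_class_id (phrase : String) (class_to_id : List (String × Int)) : Int :=
  let d := PySem.Dict.ofList class_to_id
  let p := normalize_text phrase
  if d.contains p then (d.get? p).getD 0
  else
    -- 'for k in sorted(keys, key=len, reverse=True): if k in p: return ...' = find? on the sorted list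
    match List.find? (fun k => PySem.Str.isIn k p) (PySem.List.sorted d.keys (fun k => PySem.Str.len k) true) with
    | some k => (d.get? k).getD 0
    | none => 0

-- ===== PORT B =====
-- one pass over the dict items, keeping (best_len, best_id); strict '>' keeps the first longest
def map_phrase_to_class_id_alt (phrase : String) (class_to_id : List (String × Int)) : Int :=
  let p := normalize_text phrase
  let best := (PySem.Dict.ofList class_to_id).items.foldl
    (fun (acc : Int × Int) kv =>
      if acc.1 < PySem.Str.len kv.1 && PySem.Str.isIn kv.1 p then (PySem.Str.len kv.1, kv.2) else acc)
    (-1, 0)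
  best.2

-- ===== PRECONDITION & SPEC =====
def Spec_map_phrase_to_class_id (phrase : String) (class_to_id : List (String × Int)) (out : Int) : Prop := out = map_phrase_to_class_id_alt phrase class_to_id
instance (phrase : String) (class_to_id : List (String × Int)) (out : Int) : Decidable (Spec_map_phrase_to_class_id phrase class_to_id out) := by unfold Spec_map_phrase_to_class_id; infer_instance

-- ===== CLAIM (what is proved, stated in full; the proofs are below) =====
def Claim_equal_map_phrase_to_class_id : Prop := ∀ (phrase : String) (class_to_id : List (String × Int)), Dom_map_phrase_to_class_id phrase class_to_id → Spec_map_phrase_to_class_id phrase class_to_id (map_phrase_to_class_id phrase class_to_id)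

-- ===== LEMMAS AND PROOFS =====

-- One step of Python's max(..., key=...) fold, peeled off the right end.
theorem max?_snoc {α : Type} (key : α → Int) (l : List α) (x : α) :
    PySem.List.max? (l ++ [x]) key =
      match PySem.List.max? l key with
      | none => some x
      | some m => if key m < key x then some x else some m := by
  unfold PySem.List.max?
  rw [List.foldl_append]
  rcases List.foldl (fun acc x => match acc with
      | none => some x
      | some m => if key m < key x then some x else some m) none l with _ | m
  · rfl
  · rfl

-- Inserting x into a length-descending list: where the first pred-hit lands.
theorem find?_insertBy_desc {α : Type} (key : α → Int) (pred : α → Bool) (x : α) (S : List α)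
    (hS : S.Pairwise (fun a b => key b ≤ key a)) :
    List.find? pred (PySem.List.insertBy (fun a b => decide (key b < key a)) x S) =
      match List.find? pred S with
      | none => if pred x then some x else none
      | some m => if pred x && decide (key m < key x) then some x else some m := by
  induction S with
  | nil =>
    simp [PySem.List.insertBy, List.find?]
  | cons y ys ih =>
    rw [List.pairwise_cons] at hS
    obtain ⟨hy, hys⟩ := hS
    by_cases hlt : key y < key x
    · have hins : PySem.List.insertBy (fun a b => decide (key b < key a)) x (y :: ys) = x :: y :: ys := by
        simp [PySem.List.insertBy, hlt]
      rw [hins]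
      rcases hfy : List.find? pred (y :: ys) with _ | m
      · by_cases hx : pred x
        · rw [List.find?_cons_of_pos hx]; simp [hx]
        · rw [List.find?_cons_of_neg (by simpa using hx), hfy]; simp [hx]
      · have hmle : key m ≤ key y := by
          have hm := List.mem_of_find?_eq_some hfy
          rcases List.mem_cons.mp hm with rfl | hm'
          · exact le_refl _
          · exact hy m hm'
        have hmx : key m < key x := lt_of_le_of_lt hmle hlt
        by_cases hx : pred x
        · rw [List.find?_cons_of_pos hx]; simp [hx, hmx]
        · rw [List.find?_cons_of_neg (by simpa using hx), hfy]; simp [hx]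
    · have hins : PySem.List.insertBy (fun a b => decide (key b < key a)) x (y :: ys) =
          y :: PySem.List.insertBy (fun a b => decide (key b < key a)) x ys := by
        simp [PySem.List.insertBy, hlt]
      rw [hins]
      by_cases hpy : pred y
      · rw [List.find?_cons_of_pos hpy, List.find?_cons_of_pos hpy]
        simp [hlt]
      · rw [List.find?_cons_of_neg (by simpa using hpy),
            List.find?_cons_of_neg (by simpa using hpy)]
        exact ih hys

-- First pred-hit of the length-descending stable sort = first maximal element of the filtered list.
theorem find?_sorted_rev_eq_max?_filter {α : Type} (key : α → Int) (pred : α → Bool) (ks : List α) :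
    List.find? pred (PySem.List.sorted ks key true) =
      PySem.List.max? (ks.filter pred) key := by
  induction ks using List.reverseRecOn with
  | nil => simp [PySem.List.sorted, PySem.List.max?]
  | append_singleton ks x ih =>
    have hsorted : PySem.List.sorted (ks ++ [x]) key true =
        PySem.List.insertBy (fun a b => decide (key b < key a)) x (PySem.List.sorted ks key true) := by
      simp [PySem.List.sorted, List.foldl_append]
    rw [hsorted,
      find?_insertBy_desc key pred x _ (PySem.List.sorted_pairwise_rev ks key), ih]
    by_cases hx : pred x
    · have hfilter : (ks ++ [x]).filter pred = ks.filter pred ++ [x] := by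
        simp [List.filter_append, hx]
      rw [hfilter, max?_snoc]
      rcases PySem.List.max? (ks.filter pred) key with _ | m
      · simp [hx]
      · simp [hx]
    · have hfilter : (ks ++ [x]).filter pred = ks.filter pred := by
        simp [List.filter_append, hx]
      rw [hfilter]
      rcases PySem.List.max? (ks.filter pred) key with _ | m
      all_goals simp [hx]

-- If p itself is a key, p is the unique longest substring-of-p candidate, so max picks it.
theorem max?_filter_self (p : String) (ks : List String) (hp : p ∈ ks) :
    PySem.List.max? (ks.filter (fun k => PySem.Str.isIn k p)) (fun k => PySem.Str.len k) = some p := by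
  have hpred : PySem.Str.isIn p p = true := by
    simp [PySem.Chars.isIn_iff_infix]
  have hpmem : p ∈ ks.filter (fun k => PySem.Str.isIn k p) := List.mem_filter.mpr ⟨hp, hpred⟩
  rcases hM : PySem.List.max? (ks.filter (fun k => PySem.Str.isIn k p)) (fun k => PySem.Str.len k)
      with _ | m
  · rw [PySem.List.max?_eq_none_iff] at hM
    rw [hM] at hpmem
    simp at hpmem
  · have hmmem := PySem.List.max?_mem hM
    have hmin := List.mem_filter.mp hmmem
    have hinf : m.toList <:+: p.toList := (PySem.Str.isIn_iff_infix m p).mp hmin.2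
    have hlen : m.toList.length ≤ p.toList.length := hinf.length_le
    have hge : PySem.Str.len p ≤ PySem.Str.len m := PySem.List.max?_isMax hM p hpmem
    have hlen' : p.toList.length ≤ m.toList.length := by
      simpa [PySem.Str.len] using hge
    have : m.toList = p.toList := hinf.sublist.eq_of_length (le_antisymm hlen hlen')
    rw [String.toList_inj.mp this]

-- max over a mapped list = mapped max (same key).
theorem max?_map {α β : Type} (f : α → β) (key : β → Int) (l : List α) :
    PySem.List.max? (l.map f) key = Option.map f (PySem.List.max? l (fun a => key (f a))) := by
  induction l using List.reverseRecOn with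
  | nil => simp [PySem.List.max?]
  | append_singleton l x ih =>
    rw [List.map_append, List.map_singleton, max?_snoc, max?_snoc, ih]
    rcases PySem.List.max? l (fun a => key (f a)) with _ | m
    · rfl
    · simp only [Option.map_some]
      by_cases h : key (f m) < key (f x)
      · simp [h]
      · simp [h]

-- B's accumulator loop computes the first length-maximal substring candidate (and its value).
theorem foldl_best_eq_max? (p : String) (l : List (String × Int)) :
    l.foldl
      (fun (acc : Int × Int) kv =>
        if acc.1 < PySem.Str.len kv.1 && PySem.Str.isIn kv.1 p then (PySem.Str.len kv.1, kv.2) else acc)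
      (-1, 0) =
    match PySem.List.max? (l.filter (fun kv => PySem.Str.isIn kv.1 p)) (fun kv => PySem.Str.len kv.1) with
    | none => (-1, 0)
    | some kv => (PySem.Str.len kv.1, kv.2) := by
  induction l using List.reverseRecOn with
  | nil => simp [PySem.List.max?]
  | append_singleton l x ih =>
    rw [List.foldl_append, List.foldl_cons, List.foldl_nil, ih]
    by_cases hx : PySem.Str.isIn x.1 p = true
    · have hfilter : (l ++ [x]).filter (fun kv => PySem.Str.isIn kv.1 p) =
          l.filter (fun kv => PySem.Str.isIn kv.1 p) ++ [x] := by
        rw [List.filter_append]; simp only [List.filter_cons, hx, if_true, List.filter_nil]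
      rw [hfilter, max?_snoc]
      have hlen0 : (0 : Int) ≤ PySem.Str.len x.1 := by
        simp only [PySem.Str.len]; positivity
      rcases hM : PySem.List.max? (l.filter (fun kv => PySem.Str.isIn kv.1 p)) (fun kv => PySem.Str.len kv.1)
          with _ | m
      · simp only [hM]
        rw [if_pos]
        rw [hx, Bool.and_true, decide_eq_true_eq]
        omega
      · simp only [hM, hx, Bool.and_true]
        by_cases hlt : PySem.Str.len m.1 < PySem.Str.len x.1
        · rw [if_pos (by exact decide_eq_true hlt), if_pos hlt]
        · rw [if_neg (by simpa using hlt), if_neg hlt]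
    · have hx' : PySem.Str.isIn x.1 p = false := by
        rcases h : PySem.Str.isIn x.1 p with _ | _
        · rfl
        · exact absurd h hx
      have hfilter : (l ++ [x]).filter (fun kv => PySem.Str.isIn kv.1 p) =
          l.filter (fun kv => PySem.Str.isIn kv.1 p) := by
        rw [List.filter_append]; simp only [List.filter_cons, hx', List.filter_nil]
        simp
      rw [hfilter]
      rcases hM : PySem.List.max? (l.filter (fun kv => PySem.Str.isIn kv.1 p)) (fun kv => PySem.Str.len kv.1)
          with _ | m
      · simp only [hM]
        rw [if_neg (by intro h; rw [hx', Bool.and_false] at h; cases h)]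
      · simp only [hM]
        rw [if_neg (by intro h; rw [hx', Bool.and_false] at h; cases h)]

-- bridge: the key-level max over filtered keys is the fst of the pair-level max over filtered items.
theorem max?_keys_eq (p : String) (l : List (String × Int)) :
    PySem.List.max? ((l.map Prod.fst).filter (fun k => PySem.Str.isIn k p)) (fun k => PySem.Str.len k) =
      Option.map Prod.fst
        (PySem.List.max? (l.filter (fun kv => PySem.Str.isIn kv.1 p)) (fun kv => PySem.Str.len kv.1)) := by
  rw [List.filter_map, max?_map]
  rfl

-- ===== VERDICT (by name: the statement is the Claim_ definition above) =====
theorem map_phrase_to_class_id_spec : Claim_equal_map_phrase_to_class_id := by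
  intro phrase class_to_id _
  unfold Spec_map_phrase_to_class_id map_phrase_to_class_id map_phrase_to_class_id_alt
  set d := PySem.Dict.ofList class_to_id with hd
  set p := normalize_text phrase with hp
  have hkeys : d.keys = d.items.map Prod.fst := by
    simp [PySem.Dict.keys]
  have hnodup : d.keys.Nodup := PySem.Dict.nodup_keys_ofList class_to_id
  -- B's value, characterised via the key-level max over d.keys
  have hB :
      (d.items.foldl
        (fun (acc : Int × Int) kv =>
          if acc.1 < PySem.Str.len kv.1 && PySem.Str.isIn kv.1 p then (PySem.Str.len kv.1, kv.2) else acc)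
        (-1, 0)).2 =
      match PySem.List.max? (d.keys.filter (fun k => PySem.Str.isIn k p)) (fun k => PySem.Str.len k) with
      | none => 0
      | some m => (d.get? m).getD 0 := by
    rw [foldl_best_eq_max?, hkeys, max?_keys_eq]
    rcases hM : PySem.List.max? (d.items.filter (fun kv => PySem.Str.isIn kv.1 p))
        (fun kv => PySem.Str.len kv.1) with _ | kv
    · rw [hM]; rfl
    · have hmem : kv ∈ d.items := List.mem_of_mem_filter (PySem.List.max?_mem hM)
      have hmem' : (kv.1, kv.2) ∈ d.items := by simpa using hmem
      have hget : d.get? kv.1 = some kv.2 :=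
        PySem.Dict.get?_of_mem_items d hmem' hnodup
      rw [hM]
      simp [hget]
  simp only
  rw [hB]
  by_cases hc : d.contains p
  · have hpk : p ∈ d.keys := (PySem.Dict.contains_iff_mem_keys d p).mp hc
    simp only [hc, if_true]
    rw [max?_filter_self p d.keys hpk]
  · simp only [hc, Bool.false_eq_true, if_false]
    rw [find?_sorted_rev_eq_max?_filter (fun k => PySem.Str.len k) (fun k => PySem.Str.isIn k p) d.keys]
    rcases PySem.List.max? (d.keys.filter (fun k => PySem.Str.isIn k p)) (fun k => PySem.Str.len k) with _ | m
    · rfl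
    · rfl
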